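-- pv_equiv track=rewrite | github.com/dzhao14/HackerRank_code | practice/algorithms/implementation/jumping_on_clouds_revisited.py | solution
-- ===== SOURCE A (Python) =====
-- def solution(arr, k, n):
--     done = False
--     idx = 0
--     e = 100
--     while not done:
--         idx = (idx + k) % n
--         if arr[idx] == 0:
--             e -= 1
--         else:
--             e -= 3
--         if idx == 0:
--             done = True
--     return e
-- ===== SOURCE B (Python) =====
-- def solution(arr, k, n):
--     # The walk visits exactly the multiples of g = gcd(n, k); each is landed on
--     # once (0 is landed on last), so deduct per visited cloud directly.
--     a, b = abs(n), abs(k)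
--     while b:
--         a, b = b, a % b
--     e = 100
--     for i in range(0, n, a):
--         e -= 1 if arr[i] == 0 else 3
--     return e
-- ===== Notes on version B (the rewrite author's own statement) =====
-- stated objective: alternative
-- what changed: Replaces the step-by-step jump simulation (done/idx loop state, one modular jump per iteration until landing back on 0) with a direct enumeration of the visited clouds, which are exactly the multiples of gcd(n, k): compute g by Euclid's algorithm and deduct once per index in range(0, n, g).
-- outside the precondition, e.g. on solution([5], 1, -1): A returns 97, B returns 100; on solution([5], 1, 0): A raises ZeroDivisionError, B returns 100; on solution([0], 1, 2): A raises IndexError, B raises IndexError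
import Mathlib
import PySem

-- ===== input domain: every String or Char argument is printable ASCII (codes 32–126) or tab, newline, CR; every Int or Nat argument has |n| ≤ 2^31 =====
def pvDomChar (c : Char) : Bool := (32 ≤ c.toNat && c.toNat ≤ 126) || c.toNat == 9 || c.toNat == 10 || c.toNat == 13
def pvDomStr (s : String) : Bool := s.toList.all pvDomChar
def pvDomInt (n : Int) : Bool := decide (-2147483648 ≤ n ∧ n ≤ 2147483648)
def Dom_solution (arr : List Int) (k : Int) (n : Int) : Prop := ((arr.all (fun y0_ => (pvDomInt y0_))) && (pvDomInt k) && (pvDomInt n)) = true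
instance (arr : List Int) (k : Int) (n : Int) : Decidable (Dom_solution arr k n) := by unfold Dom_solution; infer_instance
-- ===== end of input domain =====

-- B replaces A's step-by-step round-trip simulation with a direct enumeration of the
-- visited clouds (the multiples of gcd(n, k)); objective: alternative decomposition with
-- no simulated jump state.

-- ===== PORT A =====
-- A's while-loop; the fuel n.toNat suffices on Pre_ (the walk is back at cloud 0 after
-- n / gcd(n,k) ≤ n steps, which is proved below and is where the loop exits)
def solutionGo (arr : List Int) (k : Int) (n : Int) : Nat → Int → Int → Int
  | 0, _, e => e
  | fuel + 1, idx, e =>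
    let idx' := PySem.Int.mod (idx + k) n
    let e' := if (PySem.List.pyGet? arr idx').getD 0 = 0 then e - 1 else e - 3
    if idx' = 0 then e' else solutionGo arr k n fuel idx' e'

def solution (arr : List Int) (k : Int) (n : Int) : Int :=
  solutionGo arr k n n.toNat 0 100

-- ===== PORT B =====
-- Source B's hand-written Euclid loop: while b: a, b = b, a % b
def euclid : Nat → Nat → Nat
  | a, 0 => a
  | a, b + 1 => euclid (b + 1) (a % (b + 1))
termination_by _ b => b
decreasing_by exact Nat.mod_lt _ (Nat.succ_pos b)

def solution_alt (arr : List Int) (k : Int) (n : Int) : Int :=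
  let g : Int := (euclid n.natAbs k.natAbs : Nat)
  (PySem.List.pyRange 0 n g).foldl
    (fun e i => e - (if (PySem.List.pyGet? arr i).getD 0 = 0 then 1 else 3)) 100

-- ===== PRECONDITION & SPEC =====
-- Pre_ restricts to the task's natural domain n ≥ 1 (for n = 0 A raises ZeroDivisionError;
-- for n < 0 A's value rests on Python's negative-modulus and negative-index wraparound,
-- outside the problem's domain where n is the number of clouds) and requires the farthest
-- visited cloud, index n - gcd(n,k), to be a valid index of arr (else A raises IndexError).
def Pre_solution (arr : List Int) (k : Int) (n : Int) : Prop :=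
  1 ≤ n ∧ n - (Int.gcd n k : Int) < (arr.length : Int)
instance (arr : List Int) (k : Int) (n : Int) : Decidable (Pre_solution arr k n) := by
  unfold Pre_solution; infer_instance

def pvWitness_solution : List Int × Int × Int := ([0, 1, 0], 2, 3)

def Spec_solution (arr : List Int) (k : Int) (n : Int) (out : Int) : Prop := out = solution_alt arr k n
instance (arr : List Int) (k : Int) (n : Int) (out : Int) : Decidable (Spec_solution arr k n out) := by unfold Spec_solution; infer_instance

-- ===== CLAIM (what is proved, stated in full; the proofs are below) =====
def Claim_equal_solution : Prop := ∀ (arr : List Int) (k : Int) (n : Int), Dom_solution arr k n → Pre_solution arr k n → Spec_solution arr k n (solution arr k n)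

-- ===== LEMMAS AND PROOFS =====

-- the cost deducted on landing on cloud i
def pvCost (arr : List Int) (i : Int) : Int :=
  if (PySem.List.pyGet? arr i).getD 0 = 0 then 1 else 3

lemma euclid_eq_gcd (a b : Nat) : euclid a b = Nat.gcd a b := by
  induction b using Nat.strong_induction_on generalizing a with
  | _ b ih =>
    match b with
    | 0 => simp [euclid]
    | b + 1 =>
      rw [euclid, ih (a % (b + 1)) (Nat.mod_lt _ (Nat.succ_pos b)) (b + 1)]
      rw [Nat.gcd_comm a (b+1), Nat.gcd_rec (b+1) a, Nat.gcd_comm]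

lemma foldl_sub_cost (arr : List Int) (L : List Int) (e0 : Int) :
    L.foldl (fun e i => e - (if (PySem.List.pyGet? arr i).getD 0 = 0 then 1 else 3)) e0
      = e0 - (L.map (pvCost arr)).sum := by
  induction L generalizing e0 with
  | nil => simp
  | cons x xs ih => simp [List.foldl, ih, pvCost]; ring

-- key number-theoretic fact: n ∤ t*k for 0 < t < n / gcd(n,k)  (so the loop does not
-- close before step n / gcd(n,k))
lemma key_not_dvd (k n t : Int) (hn : 1 ≤ n) (ht0 : 0 < t)
    (ht : t < n / (Int.gcd n k : Int)) : ¬ (n ∣ t * k) := by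
  intro hdvd
  have hg : 0 < Int.gcd n k := Int.gcd_pos_iff.mpr (Or.inl (by omega))
  set g : Int := (Int.gcd n k : Int) with hgdef
  have hg0 : 0 < g := by rw [hgdef]; exact_mod_cast hg
  have hdn : g ∣ n := Int.gcd_dvd_left n k
  have hdk : g ∣ k := Int.gcd_dvd_right n k
  have hq : g * (n / g) = n := Int.mul_ediv_cancel' hdn
  have hcop : IsCoprime (n / g) (k / g) := Int.isCoprime_iff_gcd_eq_one.mpr (Int.gcd_div_gcd_div_gcd hg)
  have hqt : (n / g) ∣ t := by
    have h1 : n ∣ t * (g * (k / g)) := by rwa [Int.mul_ediv_cancel' hdk]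
    have h2 : g * (n / g) ∣ g * (t * (k / g)) := by
      rw [hq]; calc n ∣ t * (g * (k / g)) := h1
        _ = g * (t * (k / g)) := by ring
    have h3 : (n / g) ∣ t * (k / g) := (mul_dvd_mul_iff_left (by omega : g ≠ 0)).mp h2
    exact hcop.dvd_of_dvd_mul_right h3
  have := Int.le_of_dvd ht0 hqt
  omega

-- the walk closes exactly at step n / gcd(n,k)
lemma close_dvd (k n : Int) (hn : 1 ≤ n) :
    n ∣ (n / (Int.gcd n k : Int)) * k := by
  have hg : 0 < Int.gcd n k := Int.gcd_pos_iff.mpr (Or.inl (by omega))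
  set g : Int := (Int.gcd n k : Int) with hgdef
  have hdn : g ∣ n := Int.gcd_dvd_left n k
  have hdk : g ∣ k := Int.gcd_dvd_right n k
  have hq : g * (n / g) = n := Int.mul_ediv_cancel' hdn
  obtain ⟨c, hc⟩ := hdk
  refine ⟨c, ?_⟩
  rw [hc]
  calc (n / g) * (g * c) = (g * (n / g)) * c := by ring
    _ = n * c := by rw [hq]

-- A's loop, unrolled: from state idx = (j·k) % n with enough fuel it deducts the costs
-- of the clouds landed on at steps j+1 … n/gcd(n,k)
lemma solutionGo_spec (arr : List Int) (k n : Int) (hn : 1 ≤ n) :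
    ∀ (fuel : Nat) (j : Nat) (e : Int),
      (j : Int) < n / (Int.gcd n k : Int) →
      (n / (Int.gcd n k : Int)).toNat - j ≤ fuel →
      solutionGo arr k n fuel (((j : Int) * k) % n) e
        = e - (((List.range' (j+1) ((n / (Int.gcd n k : Int)).toNat - j)).map
            (fun (t : Nat) => pvCost arr (((t : Int) * k) % n))).sum) := by
  have hq0 : 0 ≤ n / (Int.gcd n k : Int) := Int.ediv_nonneg (by omega) (by positivity)
  set q : Int := n / (Int.gcd n k : Int) with hqdef
  intro fuel
  induction fuel with
  | zero => intro j e hj hfuel; omega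
  | succ fuel ih =>
    intro j e hj hfuel
    rw [solutionGo]
    have hmod : PySem.Int.mod (((j : Int) * k) % n + k) n = (((j : Nat) + 1 : Int)) * k % n := by
      rw [PySem.Int.mod_eq_emod_of_pos (by omega), Int.emod_add_emod]
      ring_nf
    rw [hmod]
    by_cases hlast : ((j : Int) + 1) = q
    · have hz : ((((j : Nat)) : Int) + 1) * k % n = 0 := by
        apply Int.emod_eq_zero_of_dvd
        rw [hlast]; exact close_dvd k n hn
      rw [if_pos hz]
      have hrange : q.toNat - j = 1 := by omega
      rw [hrange, List.range'_one, List.map_cons, List.map_nil, List.sum_cons, List.sum_nil]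
      have h1 : (((j+1:Nat)):Int) * k % n = 0 := by push_cast; exact hz
      unfold pvCost
      rw [h1, hz]
      by_cases hc : (PySem.List.pyGet? arr (0:Int)).getD 0 = 0
      · rw [if_pos hc, if_pos hc]; ring
      · rw [if_neg hc, if_neg hc]; ring
    · have hnz : ((((j : Nat) + 1 : Int))) * k % n ≠ 0 := by
        intro h0
        exact key_not_dvd k n ((j:Int)+1) hn (by omega) (by omega) (Int.dvd_of_emod_eq_zero h0)
      rw [if_neg hnz]
      have hcast : (((j : Nat) + 1 : Int)) * k = (((j+1 : Nat) : Int)) * k := by push_cast; ring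
      rw [hcast]
      rw [ih (j+1) _ (by push_cast; omega) (by omega)]
      have hsplit : q.toNat - j = (q.toNat - (j+1)) + 1 := by omega
      rw [hsplit, List.range'_succ]
      rw [List.map_cons, List.sum_cons]
      unfold pvCost
      by_cases hc : (PySem.List.pyGet? arr ((((j+1:Nat)):Int) * k % n)).getD 0 = 0
      · rw [if_pos hc, if_pos hc]; ring
      · rw [if_neg hc, if_neg hc]; ring

-- B's range is exactly the list of multiples of gcd(n,k) below n
lemma pyRange_eq_multiples (k n : Int) (hn : 1 ≤ n) :
    PySem.List.pyRange 0 n (Int.gcd n k : Int)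
      = (List.range (n / (Int.gcd n k : Int)).toNat).map (fun (j : Nat) => (Int.gcd n k : Int) * (j : Int)) := by
  have hgn : 0 < Int.gcd n k := Int.gcd_pos_iff.mpr (Or.inl (by omega))
  have hg0 : (0:Int) < (Int.gcd n k : Int) := by exact_mod_cast hgn
  have hdn : (Int.gcd n k : Int) ∣ n := Int.gcd_dvd_left n k
  rw [PySem.List.pyRange_of_pos 0 n hg0]
  have hceil : ((n - 0 + (Int.gcd n k : Int) - 1) / (Int.gcd n k : Int)) = n / (Int.gcd n k : Int) := by
    obtain ⟨q, hq⟩ := hdn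
    have h1 : n - 0 + (Int.gcd n k : Int) - 1 = ((Int.gcd n k : Int) - 1) + (Int.gcd n k : Int) * q := by omega
    have hL : (n - 0 + (Int.gcd n k : Int) - 1) / (Int.gcd n k : Int) = q := by
      rw [h1, Int.add_mul_ediv_left _ _ (by omega : (Int.gcd n k : Int) ≠ 0),
          Int.ediv_eq_zero_of_lt (by omega) (by omega)]
      omega
    have hR : n / (Int.gcd n k : Int) = q := by
      have h2 := Int.mul_ediv_cancel_left (b := q) (by omega : (Int.gcd n k : Int) ≠ 0)
      rwa [← hq] at h2
    rw [hL, hR]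
  rw [if_pos (by omega : (0:Int) < n), hceil]
  simp

-- the residues A visits are a permutation of the multiples of gcd(n,k) below n
lemma visited_perm (k n : Int) (hn : 1 ≤ n) :
    ((List.range' 1 (n / (Int.gcd n k : Int)).toNat).map (fun (t : Nat) => ((t : Int) * k) % n)).Perm
      ((List.range (n / (Int.gcd n k : Int)).toNat).map (fun (j : Nat) => (Int.gcd n k : Int) * (j : Int))) := by
  have hgn : 0 < Int.gcd n k := Int.gcd_pos_iff.mpr (Or.inl (by omega))
  have hg0 : (0:Int) < (Int.gcd n k : Int) := by exact_mod_cast hgn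
  have hdn : (Int.gcd n k : Int) ∣ n := Int.gcd_dvd_left n k
  have hdk : (Int.gcd n k : Int) ∣ k := Int.gcd_dvd_right n k
  have hgq : (n / (Int.gcd n k : Int)) * (Int.gcd n k : Int) = n := Int.ediv_mul_cancel hdn
  have hnd : ((List.range' 1 (n / (Int.gcd n k : Int)).toNat).map (fun (t : Nat) => ((t : Int) * k) % n)).Nodup := by
    refine List.Nodup.map_on ?_ (List.nodup_range')
    intro s hs t ht heq
    simp only [List.mem_range'_1] at hs ht
    rcases lt_trichotomy s t with hlt | he | hlt
    · exfalso
      have hd : n ∣ ((t : Int) - (s : Int)) * k := by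
        have h0 := Int.emod_eq_emod_iff_emod_sub_eq_zero.mp heq.symm
        have h2 : (t : Int) * k - (s : Int) * k = ((t:Int) - (s:Int)) * k := by ring
        rw [h2] at h0
        exact Int.dvd_of_emod_eq_zero h0
      exact key_not_dvd k n _ hn (by omega) (by omega) hd
    · exact he
    · exfalso
      have hd : n ∣ ((s : Int) - (t : Int)) * k := by
        have h0 := Int.emod_eq_emod_iff_emod_sub_eq_zero.mp heq
        have h2 : (s : Int) * k - (t : Int) * k = ((s:Int) - (t:Int)) * k := by ring
        rw [h2] at h0
        exact Int.dvd_of_emod_eq_zero h0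
      exact key_not_dvd k n _ hn (by omega) (by omega) hd
  have hsub : ((List.range' 1 (n / (Int.gcd n k : Int)).toNat).map (fun (t : Nat) => ((t : Int) * k) % n))
      ⊆ ((List.range (n / (Int.gcd n k : Int)).toNat).map (fun (j : Nat) => (Int.gcd n k : Int) * (j : Int))) := by
    intro x hx
    simp only [List.mem_map, List.mem_range'_1] at hx
    obtain ⟨t, ht, rfl⟩ := hx
    have hx0 : 0 ≤ ((t : Int) * k) % n := Int.emod_nonneg _ (by omega)
    have hxn : ((t : Int) * k) % n < n := Int.emod_lt_of_pos _ (by omega)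
    have hgx : (Int.gcd n k : Int) ∣ ((t : Int) * k) % n := by
      have h1 : ((t : Int) * k) % n % (Int.gcd n k : Int) = ((t : Int) * k) % (Int.gcd n k : Int) :=
        Int.emod_emod_of_dvd _ hdn
      have h2 : ((t : Int) * k) % (Int.gcd n k : Int) = 0 := Int.emod_eq_zero_of_dvd (Dvd.dvd.mul_left hdk _)
      exact Int.dvd_of_emod_eq_zero (by rw [h1, h2])
    simp only [List.mem_map, List.mem_range]
    refine ⟨((((t : Int) * k) % n) / (Int.gcd n k : Int)).toNat, ?_, ?_⟩
    · have h5 : (((t : Int) * k) % n) / (Int.gcd n k : Int) < n / (Int.gcd n k : Int) :=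
        (Int.ediv_lt_iff_lt_mul hg0).mpr (by omega)
      have h4 : 0 ≤ (((t : Int) * k) % n) / (Int.gcd n k : Int) := Int.ediv_nonneg hx0 (by omega)
      omega
    · have h3 : (Int.gcd n k : Int) * ((((t : Int) * k) % n) / (Int.gcd n k : Int)) = ((t : Int) * k) % n :=
        Int.mul_ediv_cancel' hgx
      have h4 : 0 ≤ (((t : Int) * k) % n) / (Int.gcd n k : Int) := Int.ediv_nonneg hx0 (by omega)
      rw [Int.toNat_of_nonneg h4]
      omega
  have hlen : ((List.range (n / (Int.gcd n k : Int)).toNat).map (fun (j : Nat) => (Int.gcd n k : Int) * (j : Int))).length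
      ≤ ((List.range' 1 (n / (Int.gcd n k : Int)).toNat).map (fun (t : Nat) => ((t : Int) * k) % n)).length := by
    simp
  exact (hnd.subperm hsub).perm_of_length_le hlen

-- ===== VERDICT (by name: the statement is the Claim_ definition above) =====
theorem solution_spec : Claim_equal_solution := by
  intro arr k n hdom hpre
  obtain ⟨hn, -⟩ := hpre
  have hgn : 0 < Int.gcd n k := Int.gcd_pos_iff.mpr (Or.inl (by omega))
  have hg0 : (0:Int) < (Int.gcd n k : Int) := by exact_mod_cast hgn
  have hdn : (Int.gcd n k : Int) ∣ n := Int.gcd_dvd_left n k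
  have hq0 : 0 < n / (Int.gcd n k : Int) := (Int.lt_ediv_iff_mul_lt hg0 hdn).mpr (by omega)
  have hqle : n / (Int.gcd n k : Int) ≤ n := Int.ediv_le_self _ (by omega)
  unfold Spec_solution solution solution_alt
  show solutionGo arr k n n.toNat 0 100
      = (PySem.List.pyRange 0 n ((euclid n.natAbs k.natAbs : Nat) : Int)).foldl
          (fun e i => e - (if (PySem.List.pyGet? arr i).getD 0 = 0 then 1 else 3)) 100
  have hge : ((euclid n.natAbs k.natAbs : Nat) : Int) = (Int.gcd n k : Int) := by
    rw [euclid_eq_gcd]; rfl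
  rw [hge, pyRange_eq_multiples k n hn, foldl_sub_cost]
  have h0 : solutionGo arr k n n.toNat 0 100 = solutionGo arr k n n.toNat (((0:Nat) : Int) * k % n) 100 := by
    norm_num
  have ha1 : ((0:Nat) : Int) < n / (Int.gcd n k : Int) := by exact_mod_cast hq0
  have ha2 : (n / (Int.gcd n k : Int)).toNat - 0 ≤ n.toNat := by omega
  rw [h0, solutionGo_spec arr k n hn n.toNat 0 100 ha1 ha2]
  have hperm := ((visited_perm k n hn).map (pvCost arr)).sum_eq
  rw [List.map_map, List.map_map] at hperm
  rw [List.map_map]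
  simp only [Function.comp_def] at hperm ⊢
  simp only [Nat.zero_add, Nat.sub_zero]
  rw [hperm]
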